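-- pv_equiv track=rewrite | github.com/Sandro4433/Thesis | python/Vision_Module/geometry.py | id_to_square_map
-- ===== SOURCE A (Python) =====
-- from typing import Dict, Tuple, Literal
--
-- def id_to_square_map(cols: int = 11, rows: int = 8) -> Dict[int, Tuple[int, int]]:
--     """
--     IDs assigned row-major over black squares, with top-left square black (ID 0).
--     """
--     m: Dict[int, Tuple[int, int]] = {}
--     k = 0
--     for j in range(rows):
--         for i in range(cols):
--             if (i + j) % 2 == 0:
--                 m[k] = (i, j)
--                 k += 1
--     return m
-- ===== SOURCE B (Python) =====
-- def id_to_square_map(cols: int = 11, rows: int = 8):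
--     """
--     IDs assigned row-major over black squares, with top-left square black (ID 0).
--     """
--     coords = [(i, j) for j in range(rows) for i in range(j % 2, cols, 2)]
--     return dict(enumerate(coords))
-- ===== Notes on version B (the rewrite author's own statement) =====
-- stated objective: simpler
-- what changed: B drops the per-cell parity test and the running id counter: it enumerates only the black columns of each row with a stride-2 range, collects the coordinates in one comprehension, and assigns ids with dict(enumerate(...)).
import Mathlib
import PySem

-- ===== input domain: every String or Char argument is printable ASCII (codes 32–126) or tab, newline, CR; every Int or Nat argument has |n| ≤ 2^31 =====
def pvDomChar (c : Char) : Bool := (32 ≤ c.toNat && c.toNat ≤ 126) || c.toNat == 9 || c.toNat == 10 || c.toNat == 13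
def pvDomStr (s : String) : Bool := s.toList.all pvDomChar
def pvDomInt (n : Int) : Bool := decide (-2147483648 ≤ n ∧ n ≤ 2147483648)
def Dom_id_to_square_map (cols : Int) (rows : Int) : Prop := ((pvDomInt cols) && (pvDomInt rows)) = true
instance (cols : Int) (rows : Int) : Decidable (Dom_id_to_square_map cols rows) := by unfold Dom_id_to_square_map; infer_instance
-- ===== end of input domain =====

-- B replaces A's per-cell parity test and running id counter by a stride-2 range over the
-- black columns of each row and dict(enumerate(...)); objective: simpler.

-- ===== PORT A =====
def id_to_square_map (cols : Int) (rows : Int) : List (Int × Int × Int) :=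
  ((PySem.List.pyRange 0 rows 1).foldl (fun (st : List (Int × Int × Int) × Int) j =>
    (PySem.List.pyRange 0 cols 1).foldl (fun (st : List (Int × Int × Int) × Int) i =>
      if PySem.Int.mod (i + j) 2 = 0 then (st.1 ++ [(st.2, i, j)], st.2 + 1) else st) st)
    ([], 0)).1

-- ===== PORT B =====
def id_to_square_map_alt (cols : Int) (rows : Int) : List (Int × Int × Int) :=
  PySem.List.enumerate
    ((PySem.List.pyRange 0 rows 1).flatMap (fun j =>
      (PySem.List.pyRange (PySem.Int.mod j 2) cols 2).map (fun i => (i, j)))) 0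

-- ===== PRECONDITION & SPEC =====
def Spec_id_to_square_map (cols : Int) (rows : Int) (out : List (Int × Int × Int)) : Prop := out = id_to_square_map_alt cols rows
instance (cols : Int) (rows : Int) (out : List (Int × Int × Int)) : Decidable (Spec_id_to_square_map cols rows out) := by unfold Spec_id_to_square_map; infer_instance

-- ===== CLAIM (what is proved, stated in full; the proofs are below) =====
def Claim_equal_id_to_square_map : Prop := ∀ (cols : Int) (rows : Int), Dom_id_to_square_map cols rows → Spec_id_to_square_map cols rows (id_to_square_map cols rows)

-- ===== LEMMAS AND PROOFS =====

-- A's inner loop (append-if with running counter) over any list L equals appending the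
-- enumeration, from id k, of the filtered cells.
theorem inner_fold_eq (L : List Int) (j : Int) (acc : List (Int × Int × Int)) (k : Int) :
    L.foldl (fun (st : List (Int × Int × Int) × Int) i =>
      if PySem.Int.mod (i + j) 2 = 0 then (st.1 ++ [(st.2, i, j)], st.2 + 1) else st) (acc, k)
    = (acc ++ PySem.List.enumerate ((L.filter (fun i => decide (PySem.Int.mod (i + j) 2 = 0))).map (fun i => (i, j))) k,
       k + ((L.filter (fun i => decide (PySem.Int.mod (i + j) 2 = 0))).length : Int)) := by
  induction L generalizing acc k with
  | nil => simp [PySem.List.enumerate_nil]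
  | cons x xs ih =>
    rw [List.foldl_cons]
    by_cases h : PySem.Int.mod (x + j) 2 = 0
    · rw [if_pos h, ih, List.filter_cons, if_pos (by simpa using h), List.map_cons,
         PySem.List.enumerate_cons]
      refine Prod.ext ?_ ?_
      · simp
      · simp
        ring
    · rw [if_neg h, ih, List.filter_cons, if_neg (by simpa using h)]

theorem pyRange_pos_eq_nil (a b s : Int) (hs : 0 < s) (h : b ≤ a) :
    PySem.List.pyRange a b s = [] := by
  rw [PySem.List.pyRange_of_pos a b hs]
  simp [show ¬ a < b by omega]

-- stride-2 range grows on the right exactly when the new endpoint has the right parity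
theorem pyRange_two_succ_right (a b : Int) (ha : a ≤ b) :
    PySem.List.pyRange a (b + 1) 2
    = if (b - a) % 2 = 0 then PySem.List.pyRange a b 2 ++ [b] else PySem.List.pyRange a b 2 := by
  rw [PySem.List.pyRange_of_pos a (b+1) (by norm_num), PySem.List.pyRange_of_pos a b (by norm_num)]
  by_cases hab : a = b
  · subst hab
    simp
  · have hlt : a < b := lt_of_le_of_ne ha hab
    have hlt' : a < b + 1 := by omega
    simp only [if_pos hlt, if_pos hlt']
    by_cases hp : (b - a) % 2 = 0
    · have h1 : ((b + 1 - a + 2 - 1) / 2).toNat = ((b - a + 2 - 1) / 2).toNat + 1 := by omega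
      rw [if_pos hp, h1, List.range_succ, List.map_append]
      simp
      omega
    · have h1 : ((b + 1 - a + 2 - 1) / 2).toNat = ((b - a + 2 - 1) / 2).toNat := by omega
      rw [if_neg hp, h1]

-- the parity-filtered full range IS the stride-2 range over the black columns
theorem filter_parity_eq (j : Int) (cols : Int) :
    (PySem.List.pyRange 0 cols 1).filter (fun i => decide (PySem.Int.mod (i + j) 2 = 0))
    = PySem.List.pyRange (PySem.Int.mod j 2) cols 2 := by
  have hm : PySem.Int.mod j 2 = j % 2 := PySem.Int.mod_eq_emod_of_pos (by norm_num)
  have hmr : 0 ≤ j % 2 ∧ j % 2 < 2 := ⟨Int.emod_nonneg j (by norm_num), Int.emod_lt_of_pos j (by norm_num)⟩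
  rcases le_or_gt cols 0 with hc | hc
  · rw [PySem.List.pyRange_one_eq_nil hc, List.filter_nil]
    exact (pyRange_pos_eq_nil _ _ _ (by norm_num) (by omega)).symm
  · -- induction on cols ≥ 1 via Int.le_induction
    have main : ∀ c : Int, 0 ≤ c →
        (PySem.List.pyRange 0 c 1).filter (fun i => decide (PySem.Int.mod (i + j) 2 = 0))
        = PySem.List.pyRange (PySem.Int.mod j 2) c 2 := by
      intro c hcn
      induction c, hcn using Int.le_induction with
      | base =>
        rw [PySem.List.pyRange_one_eq_nil le_rfl, List.filter_nil]
        exact (pyRange_pos_eq_nil _ _ _ (by norm_num) (by omega)).symm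
      | succ c hcn ih =>
        rw [PySem.List.pyRange_one_succ_right hcn, List.filter_append, ih, List.filter_singleton]
        rcases le_or_gt (j % 2) c with hjc | hjc
        · rw [hm, pyRange_two_succ_right _ _ hjc]
          have hcmod : PySem.Int.mod (c + j) 2 = (c + j) % 2 :=
            PySem.Int.mod_eq_emod_of_pos (by norm_num)
          by_cases hp : (c - j % 2) % 2 = 0
          · rw [if_pos hp]
            have hd : (2:Int) ∣ c + j := by omega
            simp [hd]
          · rw [if_neg hp]
            have hd : ¬ (2:Int) ∣ c + j := by omega
            simp [hd]
        · -- c < j % 2 < 2, and 0 ≤ c, so c = 0 and j % 2 = 1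
          have hc0 : c = 0 := by omega
          have hj1 : j % 2 = 1 := by omega
          have hcmod : PySem.Int.mod (c + j) 2 = (c + j) % 2 :=
            PySem.Int.mod_eq_emod_of_pos (by norm_num)
          have hd : ¬ (2:Int) ∣ c + j := by omega
          rw [pyRange_pos_eq_nil _ _ _ (by norm_num) (by omega),
              pyRange_pos_eq_nil _ _ _ (by norm_num) (by omega)]
          simp [hd]
    exact main cols (by omega)

-- the outer loop: fold over any row list equals enumerating the flatMap of black rows
theorem outer_fold_eq (cols : Int) (R : List Int) (acc : List (Int × Int × Int)) (k : Int) :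
    (R.foldl (fun (st : List (Int × Int × Int) × Int) j =>
      (PySem.List.pyRange 0 cols 1).foldl (fun (st : List (Int × Int × Int) × Int) i =>
        if PySem.Int.mod (i + j) 2 = 0 then (st.1 ++ [(st.2, i, j)], st.2 + 1) else st) st) (acc, k)).1
    = acc ++ PySem.List.enumerate
        (R.flatMap (fun j => (PySem.List.pyRange (PySem.Int.mod j 2) cols 2).map (fun i => (i, j)))) k := by
  induction R generalizing acc k with
  | nil => simp [PySem.List.enumerate_nil]
  | cons j R ih =>
    rw [List.foldl_cons, inner_fold_eq, filter_parity_eq, ih, List.flatMap_cons,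
        PySem.List.enumerate_append, List.append_assoc]
    simp

-- ===== VERDICT (by name: the statement is the Claim_ definition above) =====
theorem id_to_square_map_spec : Claim_equal_id_to_square_map := by
  intro cols rows _
  unfold Spec_id_to_square_map id_to_square_map id_to_square_map_alt
  rw [outer_fold_eq]
  simp
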